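-- pv_equiv track=rewrite | github.com/qusers/qgui | Qmods/prepareTopology.py | checkPdbLib
-- ===== SOURCE A (Python) =====
-- def checkPdbLib(res_list, resnr_list, lib_list):
--     """
--     Checks if residues in res_list exist in lib_list. If they do not,
--     residue and residue number is returned.
--     """
--     missingres = []
--     missingresnr = []
--
--     for i in range(len(res_list)):
--         if res_list[i] not in lib_list:
--             if res_list[i] not in missingres:
--                 missingres.append(res_list[i])
--                 missingresnr.append(resnr_list[i])
--
--     return missingres, missingresnr
-- ===== SOURCE B (Python) =====
-- def checkPdbLib(res_list, resnr_list, lib_list):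
--     """
--     Checks if residues in res_list exist in lib_list. If they do not,
--     residue and residue number is returned.
--     """
--     # occurrences of library-absent residues, as (index, residue) pairs
--     occ = [(i, r) for i, r in enumerate(res_list) if r not in lib_list]
--     # sort by (residue, index): equal residues become one run, smallest index first
--     occ = sorted(occ, key=lambda p: (p[1], p[0]))
--     # keep the head of each run = the first occurrence of each missing residue
--     firsts = []
--     for p in occ:
--         if not firsts or firsts[-1][1] != p[1]:
--             firsts.append(p)
--     # back to first-appearance order (first-occurrence indices are distinct)
--     firsts = sorted(firsts, key=lambda p: p[0])
--     return [r for i, r in firsts], [resnr_list[i] for i, r in firsts]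
-- ===== Notes on version B (the rewrite author's own statement) =====
-- stated objective: alternative
-- what changed: A interleaves library-filtering, dedup-by-membership-scan and number collection in one indexed loop; B collects all library-absent (index, residue) occurrences, sorts them by (residue, index), keeps the head of each equal-residue run (the first occurrence), and re-sorts the survivors by index to restore first-appearance order.
import Mathlib
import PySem

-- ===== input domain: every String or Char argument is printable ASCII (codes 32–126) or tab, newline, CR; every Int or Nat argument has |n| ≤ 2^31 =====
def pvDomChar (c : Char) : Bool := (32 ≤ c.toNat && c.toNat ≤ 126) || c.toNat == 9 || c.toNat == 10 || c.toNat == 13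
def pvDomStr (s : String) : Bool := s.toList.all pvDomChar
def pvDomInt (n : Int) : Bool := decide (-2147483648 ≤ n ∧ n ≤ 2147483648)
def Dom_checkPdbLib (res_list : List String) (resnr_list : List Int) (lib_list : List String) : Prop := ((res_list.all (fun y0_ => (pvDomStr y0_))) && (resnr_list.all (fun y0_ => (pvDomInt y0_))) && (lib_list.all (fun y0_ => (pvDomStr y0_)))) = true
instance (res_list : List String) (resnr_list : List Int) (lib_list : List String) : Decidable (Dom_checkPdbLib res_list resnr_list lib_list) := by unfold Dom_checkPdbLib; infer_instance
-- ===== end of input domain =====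

-- B replaces A's interleaved membership-scan loop by sort–group–resort: collect the
-- library-absent (index, residue) occurrences, sort by (residue, index), keep each
-- run's head (= first occurrence), re-sort by index; same return value (alternative).

-- ===== PORT A =====
-- literal transliteration of A: one indexed loop, appending to two accumulators;
-- pyGetD's defaults are never reached inside Pre_ (indices in range there).
def checkPdbLib (res_list : List String) (resnr_list : List Int) (lib_list : List String) : List String × List Int :=
  (PySem.List.pyRange 0 (res_list.length : Int) 1).foldl
    (fun st i =>
      if !lib_list.contains (PySem.List.pyGetD res_list i "") then
        if !st.1.contains (PySem.List.pyGetD res_list i "") then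
          (st.1 ++ [PySem.List.pyGetD res_list i ""], st.2 ++ [PySem.List.pyGetD resnr_list i 0])
        else st
      else st)
    ([], [])

-- ===== PORT B =====
-- transliteration of Source B: occurrence list, sorted2 by (residue, index), the
-- head-of-run loop (firsts[-1] is pyGetD acc (-1)), then a sort by index;
-- pyGetD's defaults are never reached inside Pre_ (indices in range there).
def checkPdbLib_alt (res_list : List String) (resnr_list : List Int) (lib_list : List String) : List String × List Int :=
  let occ := (PySem.List.enumerate res_list 0).filter (fun p => !lib_list.contains p.2)
  let occs := PySem.List.sorted2 occ (fun p => p.2) (fun p => p.1) false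
  let firsts := occs.foldl
    (fun acc p =>
      if acc.isEmpty || !((PySem.List.pyGetD acc (-1) ((0 : Int), "")).2 == p.2) then
        acc ++ [p]
      else acc)
    []
  let firsts2 := PySem.List.sorted firsts (fun p => p.1) false
  (firsts2.map (fun p => p.2), firsts2.map (fun p => PySem.List.pyGetD resnr_list p.1 0))

-- ===== PRECONDITION & SPEC =====
-- Pre_ excludes exactly the inputs where the Python A raises IndexError: a residue
-- missing from lib_list whose first occurrence index is ≥ len(resnr_list).
def Pre_checkPdbLib (res_list : List String) (resnr_list : List Int) (lib_list : List String) : Prop :=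
  ∀ k : Nat, k < res_list.length →
    res_list.getD k "" ∉ lib_list → res_list.getD k "" ∉ res_list.take k →
    k < resnr_list.length
instance (res_list : List String) (resnr_list : List Int) (lib_list : List String) : Decidable (Pre_checkPdbLib res_list resnr_list lib_list) := by unfold Pre_checkPdbLib; infer_instance

def pvWitness_checkPdbLib : List String × List Int × List String := (["ALA", "XYZ", "ALA"], [1, 2, 3], ["ALA"])

def Spec_checkPdbLib (res_list : List String) (resnr_list : List Int) (lib_list : List String) (out : List String × List Int) : Prop := out = checkPdbLib_alt res_list resnr_list lib_list
instance (res_list : List String) (resnr_list : List Int) (lib_list : List String) (out : List String × List Int) : Decidable (Spec_checkPdbLib res_list resnr_list lib_list out) := by unfold Spec_checkPdbLib; infer_instance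

-- ===== CLAIM (what is proved, stated in full; the proofs are below) =====
def Claim_equal_checkPdbLib : Prop := ∀ (res_list : List String) (resnr_list : List Int) (lib_list : List String), Dom_checkPdbLib res_list resnr_list lib_list → Pre_checkPdbLib res_list resnr_list lib_list → Spec_checkPdbLib res_list resnr_list lib_list (checkPdbLib res_list resnr_list lib_list)

-- ===== LEMMAS AND PROOFS =====

-- the common reference value: missing residues in first-appearance order, numbers fetched at the first occurrence index
def missRef (res_list lib_list : List String) : List String :=
  (PySem.List.dedup res_list).filter (fun r => !lib_list.contains r)

def refOut (res_list : List String) (resnr_list : List Int) (lib_list : List String) : List String × List Int :=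
  (missRef res_list lib_list,
   (missRef res_list lib_list).map (fun r => PySem.List.pyGetD resnr_list (List.idxOf r res_list : Int) 0))

theorem dedup_append_singleton (ys : List String) (y : String) :
    PySem.List.dedup (ys ++ [y]) =
      if y ∈ ys then PySem.List.dedup ys else PySem.List.dedup ys ++ [y] := by
  rw [PySem.List.dedup_eq_ofList, PySem.List.dedup_eq_ofList, PySem.Set.ofList_append_singleton]
  by_cases hy : y ∈ ys
  · rw [if_pos hy, PySem.Set.add_of_mem ((PySem.Set.mem_ofList ys y).mpr hy)]
  · rw [if_neg hy, PySem.Set.add_of_not_mem (fun hc => hy ((PySem.Set.mem_ofList ys y).mp hc))]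

theorem mem_of_mem_missRef {res_list lib_list : List String} {r : String}
    (h : r ∈ missRef res_list lib_list) : r ∈ res_list := by
  unfold missRef at h
  have h1 := (List.mem_filter.mp h).1
  rw [PySem.List.dedup_eq_ofList] at h1
  exact (PySem.Set.mem_ofList _ _).mp h1

theorem missRef_append (ys lib : List String) (y : String) :
    missRef (ys ++ [y]) lib =
      if y ∈ ys ∨ y ∈ lib then missRef ys lib else missRef ys lib ++ [y] := by
  unfold missRef
  rw [dedup_append_singleton]
  by_cases hy : y ∈ ys
  · rw [if_pos hy, if_pos (Or.inl hy)]
  · rw [if_neg hy, List.filter_append]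
    by_cases hl : y ∈ lib
    · rw [if_pos (show y ∈ ys ∨ y ∈ lib from Or.inr hl)]
      simp
      exact hl
    · rw [if_neg (show ¬(y ∈ ys ∨ y ∈ lib) from by tauto)]
      simp
      exact hl

theorem pyGetD_append_left {α : Type} (xs : List α) (y : α) (i : Int) (d : α)
    (h0 : 0 ≤ i) (h : i < (xs.length : Int)) :
    PySem.List.pyGetD (xs ++ [y]) i d = PySem.List.pyGetD xs i d := by
  obtain ⟨k, rfl⟩ : ∃ k : Nat, i = (k : Int) := ⟨i.toNat, (Int.toNat_of_nonneg h0).symm⟩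
  rw [PySem.List.pyGetD_natCast, PySem.List.pyGetD_natCast]
  exact List.getD_append xs [y] d k (by exact_mod_cast h)

theorem A_eq (res_list : List String) (resnr_list : List Int) (lib_list : List String) :
    checkPdbLib res_list resnr_list lib_list = refOut res_list resnr_list lib_list := by
  induction res_list using List.reverseRecOn with
  | nil => rfl
  | append_singleton ys y ih =>
    unfold checkPdbLib at ih ⊢
    have hlen : (((ys ++ [y]).length : Nat) : Int) = (ys.length : Int) + 1 := by
      simp
    rw [hlen, PySem.List.pyRange_one_succ_right (Int.natCast_nonneg ys.length), List.foldl_append]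
    have hfold :
        List.foldl
          (fun (st : List String × List Int) i =>
            if !lib_list.contains (PySem.List.pyGetD (ys ++ [y]) i "") then
              if !st.1.contains (PySem.List.pyGetD (ys ++ [y]) i "") then
                (st.1 ++ [PySem.List.pyGetD (ys ++ [y]) i ""], st.2 ++ [PySem.List.pyGetD resnr_list i 0])
              else st
            else st)
          ([], []) (PySem.List.pyRange 0 (ys.length : Int) 1)
        = List.foldl
          (fun (st : List String × List Int) i =>
            if !lib_list.contains (PySem.List.pyGetD ys i "") then
              if !st.1.contains (PySem.List.pyGetD ys i "") then
                (st.1 ++ [PySem.List.pyGetD ys i ""], st.2 ++ [PySem.List.pyGetD resnr_list i 0])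
              else st
            else st)
          ([], []) (PySem.List.pyRange 0 (ys.length : Int) 1) := by
      apply PySem.List.foldl_congr_mem
      intro acc x hx
      rw [PySem.List.mem_pyRange_one] at hx
      rw [pyGetD_append_left ys y x "" hx.1 hx.2]
    rw [hfold, ih]
    simp only [List.foldl_cons, List.foldl_nil]
    have hy' : PySem.List.pyGetD (ys ++ [y]) ((ys.length : Nat) : Int) "" = y := by
      rw [PySem.List.pyGetD_natCast]
      simp [List.getD_eq_getElem?_getD]
    rw [hy']
    have hmap2 : (missRef ys lib_list).map
          (fun r => resnr_list[List.idxOf r (ys ++ [y])]?.getD 0)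
        = (missRef ys lib_list).map
          (fun r => resnr_list[List.idxOf r ys]?.getD 0) :=
      List.map_congr_left (fun r hr => by
        rw [List.idxOf_append, if_pos (mem_of_mem_missRef hr)])
    unfold refOut
    rw [missRef_append]
    by_cases hl : y ∈ lib_list
    · rw [if_pos (show y ∈ ys ∨ y ∈ lib_list from Or.inr hl)]
      simp [hl, hmap2]
    · by_cases hy2 : y ∈ ys
      · have hmem : y ∈ missRef ys lib_list := by
          unfold missRef
          refine List.mem_filter.mpr ⟨?_, by simpa using hl⟩
          rw [PySem.List.dedup_eq_ofList]
          exact (PySem.Set.mem_ofList _ _).mpr hy2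
        rw [if_pos (show y ∈ ys ∨ y ∈ lib_list from Or.inl hy2)]
        simp [hl, hmem, hmap2]
      · have hnm : y ∉ missRef ys lib_list := fun h => hy2 (mem_of_mem_missRef h)
        rw [if_neg (show ¬(y ∈ ys ∨ y ∈ lib_list) from by tauto)]
        have hidx : List.idxOf y (ys ++ [y]) = ys.length := by
          rw [List.idxOf_append, if_neg hy2]
          simp
        simp [hl, hnm, hmap2, hidx, List.map_append]

-- ---- B-side machinery: the lexicographic comparison sorted2 uses ----
def lexlt (a b : Int × String) : Bool :=
  decide (a.2 < b.2) || !decide (b.2 < a.2) && decide (a.1 < b.1)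

theorem lexlt_iff (a b : Int × String) :
    lexlt a b = true ↔ (a.2 < b.2 ∨ (a.2 = b.2 ∧ a.1 < b.1)) := by
  simp only [lexlt, Bool.or_eq_true, Bool.and_eq_true, Bool.not_eq_true',
    decide_eq_true_eq, decide_eq_false_iff_not]
  constructor
  · rintro (h | ⟨h1, h2⟩)
    · exact Or.inl h
    · rcases lt_trichotomy a.2 b.2 with h3 | h3 | h3
      · exact Or.inl h3
      · exact Or.inr ⟨h3, h2⟩
      · exact absurd h3 h1
  · rintro (h | ⟨h1, h2⟩)
    · exact Or.inl h
    · exact Or.inr ⟨by rw [h1]; exact lt_irrefl _, h2⟩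

theorem lexle_iff (a b : Int × String) :
    lexlt b a = false ↔ (a.2 < b.2 ∨ (a.2 = b.2 ∧ a.1 ≤ b.1)) := by
  rw [← Bool.not_eq_true, lexlt_iff]
  constructor
  · intro h
    rcases lt_trichotomy a.2 b.2 with h3 | h3 | h3
    · exact Or.inl h3
    · refine Or.inr ⟨h3, ?_⟩
      by_contra hc
      exact h (Or.inr ⟨h3.symm, by omega⟩)
    · exact absurd (Or.inl h3) h
  · rintro (h | ⟨h1, h2⟩) hc
    · rcases hc with hc | ⟨hc1, _⟩
      · exact absurd hc (lt_asymm h)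
      · exact absurd h (hc1 ▸ lt_irrefl _)
    · rcases hc with hc | ⟨_, hc2⟩
      · exact absurd hc (h1 ▸ lt_irrefl _)
      · omega

theorem lexlt_trans {a b c : Int × String} (h1 : lexlt a b = true) (h2 : lexlt b c = true) :
    lexlt a c = true := by
  rw [lexlt_iff] at *
  rcases h1 with h1 | ⟨h1, h1'⟩ <;> rcases h2 with h2 | ⟨h2, h2'⟩
  · exact Or.inl (lt_trans h1 h2)
  · exact Or.inl (h2 ▸ h1)
  · exact Or.inl (h1 ▸ h2)
  · exact Or.inr ⟨h1.trans h2, by omega⟩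

theorem lexlt_asymm {a b : Int × String} (h : lexlt a b = true) : lexlt b a = false := by
  rw [lexle_iff]
  rw [lexlt_iff] at h
  rcases h with h | ⟨h1, h2⟩
  · exact Or.inl h
  · exact Or.inr ⟨h1, h2.le⟩

theorem insertBy_lexlt_pairwise (x : Int × String) (ys : List (Int × String))
    (h : ys.Pairwise (fun a b => lexlt b a = false)) :
    (PySem.List.insertBy lexlt x ys).Pairwise (fun a b => lexlt b a = false) := by
  induction ys with
  | nil => simp [PySem.List.insertBy]
  | cons y ys ih =>
    rw [List.pairwise_cons] at h
    obtain ⟨hy, hys⟩ := h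
    by_cases hxy : lexlt x y = true
    · simp only [PySem.List.insertBy, hxy, if_pos]
      rw [List.pairwise_cons]
      refine ⟨?_, List.pairwise_cons.mpr ⟨hy, hys⟩⟩
      intro z hz
      rcases List.mem_cons.mp hz with rfl | hz
      · exact lexlt_asymm hxy
      · by_contra hc
        rw [Bool.not_eq_false] at hc
        have := lexlt_trans hc hxy
        rw [hy z hz] at this
        exact Bool.false_ne_true this
    · have hrw : PySem.List.insertBy lexlt x (y :: ys) = y :: PySem.List.insertBy lexlt x ys := by
        simp [PySem.List.insertBy, hxy]
      rw [hrw, List.pairwise_cons]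
      refine ⟨?_, ih hys⟩
      intro z hz
      rcases (PySem.List.mem_insertBy lexlt x z ys).mp hz with rfl | hz
      · exact Bool.not_eq_true _ ▸ (by simpa using hxy)
      · exact hy z hz

theorem foldl_insertBy_lexlt_pairwise (xs acc : List (Int × String))
    (hacc : acc.Pairwise (fun a b => lexlt b a = false)) :
    (xs.foldl (fun acc x => PySem.List.insertBy lexlt x acc) acc).Pairwise
      (fun a b => lexlt b a = false) := by
  induction xs generalizing acc with
  | nil => exact hacc
  | cons x xs ih => exact ih _ (insertBy_lexlt_pairwise x acc hacc)

-- head-of-run selection on the tail, carrying the residue of the last kept pair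
def chop : String → List (Int × String) → List (Int × String)
  | _, [] => []
  | t, p :: rest => if p.2 == t then chop t rest else p :: chop p.2 rest

theorem pyGetD_append_neg_one (acc : List (Int × String)) (p d : Int × String) :
    PySem.List.pyGetD (acc ++ [p]) (-1) d = p := by
  simp [PySem.List.pyGetD]

theorem foldl_firsts_eq_chop (L acc : List (Int × String)) (q : Int × String) :
    L.foldl
      (fun acc p =>
        if acc.isEmpty || !((PySem.List.pyGetD acc (-1) ((0 : Int), "")).2 == p.2) then
          acc ++ [p]
        else acc)
      (acc ++ [q]) = (acc ++ [q]) ++ chop q.2 L := by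
  induction L generalizing acc q with
  | nil => simp [chop]
  | cons p L ih =>
    rw [List.foldl_cons]
    have hne : (acc ++ [q]).isEmpty = false := by simp
    rw [hne, pyGetD_append_neg_one]
    by_cases hpq : q.2 = p.2
    · have hb : (q.2 == p.2) = true := beq_iff_eq.mpr hpq
      simp only [hb, Bool.not_true, Bool.or_false, Bool.false_eq_true, if_false]
      rw [ih, chop, if_pos (beq_iff_eq.mpr hpq.symm)]
    · have hb : (q.2 == p.2) = false := beq_eq_false_iff_ne.mpr hpq
      have hc : chop q.2 (p :: L) = p :: chop p.2 L := by
        rw [chop, if_neg (by simp [beq_eq_false_iff_ne.mpr (Ne.symm hpq)])]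
      simp only [hb, Bool.not_false, Bool.or_true, if_true]
      have h2 := ih (acc := acc ++ [q]) (q := p)
      rw [h2, hc]
      simp

theorem firsts_eq (L : List (Int × String)) :
    L.foldl
      (fun acc p =>
        if acc.isEmpty || !((PySem.List.pyGetD acc (-1) ((0 : Int), "")).2 == p.2) then
          acc ++ [p]
        else acc)
      [] = match L with
           | [] => []
           | p :: rest => p :: chop p.2 rest := by
  cases L with
  | nil => rfl
  | cons p rest =>
    rw [List.foldl_cons]
    have h0 : (([] : List (Int × String)).isEmpty || !((PySem.List.pyGetD ([] : List (Int × String)) (-1) ((0 : Int), "")).2 == p.2)) = true := by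
      simp
    rw [if_pos h0]
    have := foldl_firsts_eq_chop rest [] p
    simpa using this

theorem chop_mem (L : List (Int × String)) (t : String)
    (hL : L.Pairwise (fun a b => lexlt b a = false))
    (ht : ∀ q ∈ L, t ≤ q.2) (q : Int × String) :
    q ∈ chop t L ↔ q ∈ L ∧ q.2 ≠ t ∧ ∀ q' ∈ L, q'.2 = q.2 → q.1 ≤ q'.1 := by
  induction L generalizing t with
  | nil => simp [chop]
  | cons p L ih =>
    rw [List.pairwise_cons] at hL
    obtain ⟨hp, hL'⟩ := hL
    have hple : ∀ q' ∈ L, p.2 ≤ q'.2 := by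
      intro q' hq'
      rcases (lexle_iff p q').mp (hp q' hq') with h | ⟨h, _⟩
      · exact h.le
      · exact h.le
    by_cases hpt : p.2 = t
    · rw [chop, if_pos (beq_iff_eq.mpr hpt)]
      rw [ih t hL' (fun q' hq' => hpt ▸ hple q' hq')]
      constructor
      · rintro ⟨hm, hne, hmin⟩
        refine ⟨List.mem_cons_of_mem _ hm, hne, ?_⟩
        intro q' hq' he
        rcases List.mem_cons.mp hq' with rfl | hq'
        · exact absurd (he.symm.trans hpt) hne
        · exact hmin q' hq' he
      · rintro ⟨hm, hne, hmin⟩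
        rcases List.mem_cons.mp hm with rfl | hm
        · exact absurd hpt hne
        · exact ⟨hm, hne, fun q' hq' he => hmin q' (List.mem_cons_of_mem _ hq') he⟩
    · rw [chop, if_neg (by simpa using hpt)]
      have htp : t < p.2 := lt_of_le_of_ne (ht p (List.mem_cons_self)) (Ne.symm hpt)
      rw [List.mem_cons, ih p.2 hL' hple]
      constructor
      · rintro (rfl | ⟨hm, hne, hmin⟩)
        · refine ⟨List.mem_cons_self, hpt, ?_⟩
          intro q' hq' he
          rcases List.mem_cons.mp hq' with rfl | hq'
          · exact le_refl _
          · rcases (lexle_iff q q').mp (hp q' hq') with h | ⟨_, h⟩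
            · exact absurd he.symm (ne_of_lt h)
            · exact h
        · refine ⟨List.mem_cons_of_mem _ hm, ?_, ?_⟩
          · exact fun he => absurd (he ▸ (htp.trans_le (hple q hm))) (lt_irrefl _)
          · intro q' hq' he
            rcases List.mem_cons.mp hq' with rfl | hq'
            · exact absurd he.symm hne
            · exact hmin q' hq' he
      · rintro ⟨hm, hne, hmin⟩
        rcases List.mem_cons.mp hm with rfl | hm
        · exact Or.inl rfl
        · by_cases hq2 : q.2 = p.2
          · -- then q must BE p: same residue, both minimal
            have h1 : q.1 ≤ p.1 := hmin p List.mem_cons_self hq2.symm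
            have h2 : p.1 ≤ q.1 := by
              rcases (lexle_iff p q).mp (hp q hm) with h | ⟨_, h⟩
              · exact absurd hq2 (ne_of_gt h)
              · exact h
            have : q = p := Prod.ext (le_antisymm h1 h2) hq2
            exact Or.inl this
          · exact Or.inr ⟨hm, hq2, fun q' hq' he => hmin q' (List.mem_cons_of_mem _ hq') he⟩

theorem chop_gt (L : List (Int × String)) (t : String)
    (hL : L.Pairwise (fun a b => lexlt b a = false))
    (ht : ∀ q ∈ L, t ≤ q.2) :
    (∀ q ∈ chop t L, t < q.2) ∧ ((chop t L).map (fun p => p.2)).Pairwise (· < ·) := by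
  induction L generalizing t with
  | nil => simp [chop]
  | cons p L ih =>
    rw [List.pairwise_cons] at hL
    obtain ⟨hp, hL'⟩ := hL
    have hple : ∀ q' ∈ L, p.2 ≤ q'.2 := by
      intro q' hq'
      rcases (lexle_iff p q').mp (hp q' hq') with h | ⟨h, _⟩
      · exact h.le
      · exact h.le
    by_cases hpt : p.2 = t
    · rw [chop, if_pos (beq_iff_eq.mpr hpt)]
      exact ih t hL' (fun q' hq' => hpt ▸ hple q' hq')
    · rw [chop, if_neg (by simpa using hpt)]
      have htp : t < p.2 := lt_of_le_of_ne (ht p (List.mem_cons_self)) (Ne.symm hpt)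
      obtain ⟨ih1, ih2⟩ := ih p.2 hL' hple
      refine ⟨?_, ?_⟩
      · intro q hq
        rcases List.mem_cons.mp hq with rfl | hq
        · exact htp
        · exact htp.trans (ih1 q hq)
      · rw [List.map_cons, List.pairwise_cons]
        refine ⟨?_, ih2⟩
        intro s hs
        obtain ⟨q, hq, rfl⟩ := List.mem_map.mp hs
        exact ih1 q hq

-- first-occurrence pairs of the missing residues, in first-appearance order
def fPairs (res_list lib_list : List String) : List (Int × String) :=
  (missRef res_list lib_list).map (fun r => ((List.idxOf r res_list : Int), r))

theorem mem_missRef_iff (res_list lib_list : List String) (r : String) :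
    r ∈ missRef res_list lib_list ↔ r ∈ res_list ∧ r ∉ lib_list := by
  unfold missRef
  rw [List.mem_filter, PySem.List.dedup_eq_ofList, PySem.Set.mem_ofList]
  simp

theorem nodup_missRef (res_list lib_list : List String) :
    (missRef res_list lib_list).Nodup :=
  List.Nodup.filter _ (by rw [PySem.List.dedup_eq_ofList]; exact PySem.Set.nodup_ofList _)

theorem dedup_pairwise_idxOf (res_list : List String) :
    (PySem.List.dedup res_list).Pairwise
      (fun a b => List.idxOf a res_list < List.idxOf b res_list) := by
  induction res_list using List.reverseRecOn with
  | nil => simp [PySem.List.dedup]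
  | append_singleton ys y ih =>
    rw [dedup_append_singleton]
    by_cases hy : y ∈ ys
    · rw [if_pos hy]
      refine ih.imp_of_mem ?_
      intro a b ha hb hab
      have ha' : a ∈ ys := by
        rw [PySem.List.dedup_eq_ofList, PySem.Set.mem_ofList] at ha
        exact ha
      have hb' : b ∈ ys := by
        rw [PySem.List.dedup_eq_ofList, PySem.Set.mem_ofList] at hb
        exact hb
      rwa [List.idxOf_append, if_pos ha', List.idxOf_append, if_pos hb']
    · rw [if_neg hy, List.pairwise_append]
      refine ⟨?_, ?_, ?_⟩
      · refine ih.imp_of_mem ?_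
        intro a b ha hb hab
        have ha' : a ∈ ys := by
          rw [PySem.List.dedup_eq_ofList, PySem.Set.mem_ofList] at ha
          exact ha
        have hb' : b ∈ ys := by
          rw [PySem.List.dedup_eq_ofList, PySem.Set.mem_ofList] at hb
          exact hb
        rwa [List.idxOf_append, if_pos ha', List.idxOf_append, if_pos hb']
      · simp
      · intro a ha b hb
        rw [List.mem_singleton] at hb
        subst hb
        have ha' : a ∈ ys := by
          rw [PySem.List.dedup_eq_ofList, PySem.Set.mem_ofList] at ha
          exact ha
        rw [List.idxOf_append, if_pos ha', List.idxOf_append, if_neg hy]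
        have h1 : List.idxOf a ys < ys.length := List.idxOf_lt_length_of_mem ha'
        have h2 : List.idxOf b [b] = 0 := by simp
        omega

theorem fPairs_pairwise (res_list lib_list : List String) :
    (fPairs res_list lib_list).Pairwise (fun a b => a.1 < b.1) := by
  unfold fPairs
  rw [List.pairwise_map]
  have h1 : (missRef res_list lib_list).Pairwise
      (fun a b => List.idxOf a res_list < List.idxOf b res_list) :=
    (dedup_pairwise_idxOf res_list).filter _
  exact h1.imp (fun h => by simpa using h)

theorem nodup_fPairs (res_list lib_list : List String) :
    (fPairs res_list lib_list).Nodup := by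
  unfold fPairs
  exact (nodup_missRef res_list lib_list).map (fun a b hab => congrArg Prod.snd hab)

theorem idxOf_le_of_getElem : ∀ (l : List String) (k : Nat) (h : k < l.length),
    List.idxOf l[k] l ≤ k := by
  intro l
  induction l with
  | nil => intro k h; simp at h
  | cons x t ih =>
    intro k h
    cases k with
    | zero => simp
    | succ k =>
      have hk : k < t.length := by simpa using h
      simp only [List.getElem_cons_succ, List.idxOf_cons]
      by_cases hx : x == t[k]'hk
      · simp [hx]
      · simp only [hx, cond_false]
        have := ih k hk
        omega

-- membership in the occurrence list
theorem mem_occ_iff (res_list lib_list : List String) (q : Int × String) :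
    q ∈ (PySem.List.enumerate res_list 0).filter (fun p => !lib_list.contains p.2) ↔
      (∃ k : Nat, ∃ h : k < res_list.length, q = ((k : Int), res_list[k])) ∧ q.2 ∉ lib_list := by
  rw [List.mem_filter, PySem.List.mem_enumerate_iff]
  simp only [zero_add, Bool.not_eq_eq_eq_not, Bool.not_true, List.contains_eq_mem,
    decide_eq_false_iff_not]

theorem mem_fPairs_iff (res_list lib_list : List String) (q : Int × String) :
    q ∈ fPairs res_list lib_list ↔
      q.2 ∈ res_list ∧ q.2 ∉ lib_list ∧ q.1 = (List.idxOf q.2 res_list : Int) := by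
  unfold fPairs
  rw [List.mem_map]
  constructor
  · rintro ⟨r, hr, rfl⟩
    obtain ⟨h1, h2⟩ := (mem_missRef_iff res_list lib_list r).mp hr
    exact ⟨h1, h2, rfl⟩
  · rintro ⟨h1, h2, h3⟩
    refine ⟨q.2, (mem_missRef_iff res_list lib_list q.2).mpr ⟨h1, h2⟩, ?_⟩
    exact Prod.ext h3.symm rfl

-- the bridge: first-occurrence pairs are exactly the index-minimal occurrences
theorem min_occ_iff_fPairs (res_list lib_list : List String) (q : Int × String) :
    (q ∈ (PySem.List.enumerate res_list 0).filter (fun p => !lib_list.contains p.2) ∧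
     ∀ q' ∈ (PySem.List.enumerate res_list 0).filter (fun p => !lib_list.contains p.2),
       q'.2 = q.2 → q.1 ≤ q'.1) ↔ q ∈ fPairs res_list lib_list := by
  rw [mem_occ_iff, mem_fPairs_iff]
  constructor
  · rintro ⟨⟨⟨k, hk, rfl⟩, hlib⟩, hmin⟩
    refine ⟨List.getElem_mem hk, hlib, ?_⟩
    simp only
    have hle : List.idxOf res_list[k] res_list ≤ k := idxOf_le_of_getElem _ _ hk
    have hidxlt : List.idxOf res_list[k] res_list < res_list.length :=
      List.idxOf_lt_length_of_mem (List.getElem_mem hk)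
    have hget : res_list[List.idxOf res_list[k] res_list] = res_list[k] :=
      List.getElem_idxOf hidxlt
    have hq' := hmin ((List.idxOf res_list[k] res_list : Int), res_list[k])
      ((mem_occ_iff res_list lib_list _).mpr
        ⟨⟨List.idxOf res_list[k] res_list, hidxlt, by rw [hget]⟩, hlib⟩) rfl
    simp only at hq'
    have : (k : Int) ≤ (List.idxOf res_list[k] res_list : Int) := hq'
    omega
  · rintro ⟨h1, h2, h3⟩
    have hidxlt : List.idxOf q.2 res_list < res_list.length := List.idxOf_lt_length_of_mem h1
    refine ⟨⟨⟨List.idxOf q.2 res_list, hidxlt, ?_⟩, h2⟩, ?_⟩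
    · rw [List.getElem_idxOf hidxlt]
      exact Prod.ext h3 rfl
    · rintro q' hq' he
      obtain ⟨⟨k', hk', rfl⟩, _⟩ := (mem_occ_iff res_list lib_list q').mp hq'
      simp only at he ⊢
      rw [h3, ← he]
      have := idxOf_le_of_getElem _ _ hk'
      rw [he] at this ⊢
      omega

theorem B_eq (res_list : List String) (resnr_list : List Int) (lib_list : List String) :
    checkPdbLib_alt res_list resnr_list lib_list = refOut res_list resnr_list lib_list := by
  simp only [checkPdbLib_alt]
  set occ := (PySem.List.enumerate res_list 0).filter (fun p => !lib_list.contains p.2) with hocc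
  have hL : PySem.List.sorted2 occ (fun p => p.2) (fun p => p.1) false =
      occ.foldl (fun acc x => PySem.List.insertBy lexlt x acc) [] := rfl
  set L := occ.foldl (fun acc x => PySem.List.insertBy lexlt x acc) [] with hLdef
  have hLpair : L.Pairwise (fun a b => lexlt b a = false) :=
    foldl_insertBy_lexlt_pairwise occ [] (List.Pairwise.nil)
  have hLperm : L.Perm occ := PySem.List.foldl_insertBy_perm lexlt occ []
  rw [hL]
  rw [firsts_eq L]
  -- the selected firsts list
  set firsts := (match L with
           | [] => []
           | p :: rest => p :: chop p.2 rest) with hfirsts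
  have hmem : ∀ q, q ∈ firsts ↔ q ∈ fPairs res_list lib_list := by
    intro q
    rw [← min_occ_iff_fPairs res_list lib_list q, ← hocc]
    have hmemL : ∀ x, x ∈ L ↔ x ∈ occ := fun x => hLperm.mem_iff
    cases hLc : L with
    | nil =>
      simp only [hfirsts, hLc, List.not_mem_nil, false_iff, not_and]
      intro hq
      rw [← hmemL q, hLc] at hq
      exact absurd hq (List.not_mem_nil)
    | cons p rest =>
      have hLpair' := hLc ▸ hLpair
      rw [List.pairwise_cons] at hLpair'
      obtain ⟨hp, hrest⟩ := hLpair'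
      have hple : ∀ q' ∈ rest, p.2 ≤ q'.2 := by
        intro q' hq'
        rcases (lexle_iff p q').mp (hp q' hq') with h | ⟨h, _⟩
        · exact h.le
        · exact h.le
      have hmemL' : ∀ x, x ∈ p :: rest ↔ x ∈ occ := fun x => by rw [← hLc]; exact hLperm.mem_iff
      simp only [hfirsts, hLc, List.mem_cons]
      rw [chop_mem rest p.2 hrest hple q]
      constructor
      · rintro (rfl | ⟨hm, hne, hmin⟩)
        · refine ⟨(hmemL' q).mp List.mem_cons_self, ?_⟩
          intro q' hq' he
          rcases List.mem_cons.mp ((hmemL' q').mpr hq') with rfl | hq''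
          · exact le_refl _
          · rcases (lexle_iff q q').mp (hp q' hq'') with h | ⟨_, h⟩
            · exact absurd he.symm (ne_of_lt h)
            · exact h
        · refine ⟨(hmemL' q).mp (List.mem_cons_of_mem _ hm), ?_⟩
          intro q' hq' he
          rcases List.mem_cons.mp ((hmemL' q').mpr hq') with rfl | hq''
          · exact absurd he.symm hne
          · exact hmin q' hq'' he
      · rintro ⟨hm, hmin⟩
        have hmin' : ∀ q' ∈ p :: rest, q'.2 = q.2 → q.1 ≤ q'.1 := by
          intro q' hq' he
          exact hmin q' ((hmemL' q').mp hq') he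
        rcases List.mem_cons.mp ((hmemL' q).mpr hm) with rfl | hm'
        · exact Or.inl rfl
        · by_cases hq2 : q.2 = p.2
          · have h1 : q.1 ≤ p.1 := hmin' p List.mem_cons_self hq2.symm
            have h2 : p.1 ≤ q.1 := by
              rcases (lexle_iff p q).mp (hp q hm') with h | ⟨_, h⟩
              · exact absurd hq2 (ne_of_gt h)
              · exact h
            exact Or.inl (Prod.ext (le_antisymm h1 h2) hq2)
          · exact Or.inr ⟨hm', hq2, fun q' hq' he => hmin' q' (List.mem_cons_of_mem _ hq') he⟩
  have hnodup : firsts.Nodup := by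
    cases hLc : L with
    | nil => simp [hfirsts, hLc]
    | cons p rest =>
      have hLpair' := hLc ▸ hLpair
      rw [List.pairwise_cons] at hLpair'
      obtain ⟨hp, hrest⟩ := hLpair'
      have hple : ∀ q' ∈ rest, p.2 ≤ q'.2 := by
        intro q' hq'
        rcases (lexle_iff p q').mp (hp q' hq') with h | ⟨h, _⟩
        · exact h.le
        · exact h.le
      obtain ⟨hgt, hpw⟩ := chop_gt rest p.2 hrest hple
      have hsnd : ((p :: chop p.2 rest).map (fun x => x.2)).Pairwise (· < ·) := by
        rw [List.map_cons, List.pairwise_cons]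
        refine ⟨?_, hpw⟩
        intro s hs
        obtain ⟨x, hx, rfl⟩ := List.mem_map.mp hs
        exact hgt x hx
      have hsndnodup : ((p :: chop p.2 rest).map (fun x => x.2)).Nodup :=
        hsnd.imp ne_of_lt
      simp only [hfirsts, hLc]
      exact hsndnodup.of_map
  have hperm : (fPairs res_list lib_list).Perm firsts :=
    (List.perm_ext_iff_of_nodup (nodup_fPairs res_list lib_list) hnodup).mpr
      (fun q => (hmem q).symm)
  have hsorted : PySem.List.sorted firsts (fun p => p.1) false = fPairs res_list lib_list :=
    PySem.List.sorted_eq_of_perm_of_pairwise_lt firsts (fPairs res_list lib_list) (fun p => p.1) hperm (fPairs_pairwise res_list lib_list)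
  rw [hsorted]
  unfold refOut fPairs
  rw [List.map_map, List.map_map]
  refine Prod.ext ?_ ?_
  · simp [Function.comp_def]
  · simp [Function.comp_def]

-- ===== VERDICT (by name: the statement is the Claim_ definition above) =====
theorem checkPdbLib_spec : Claim_equal_checkPdbLib := by
  intro res_list resnr_list lib_list _ _
  unfold Spec_checkPdbLib
  rw [A_eq, B_eq]
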